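-- pv_equiv track=rewrite | github.com/mars71003219/ar | rtmo_gcn_pipeline/inference_pipeline/action_classifier.py | _apply_consecutive_window_logic
-- ===== SOURCE A (Python) =====
-- from typing import List, Dict, Tuple, Optional
--
-- def _apply_consecutive_window_logic(window_predictions: List[int],
--                                   consecutive_threshold: int = 5) -> int:
--     """
--     연속 윈도우 기반 최종 예측
--
--     Args:
--         window_predictions: 윈도우별 예측 결과 리스트
--         consecutive_threshold: 연속 Fight 예측 임계값
--
--     Returns:
--         최종 예측 결과 (0: NonFight, 1: Fight)
--     """
--     if not window_predictions:
--         return 0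
--
--     # 연속된 Fight 예측 구간 찾기
--     max_consecutive_fight = 0
--     current_consecutive_fight = 0
--
--     for prediction in window_predictions:
--         if prediction == 1:  # Fight
--             current_consecutive_fight += 1
--             max_consecutive_fight = max(max_consecutive_fight, current_consecutive_fight)
--         else:  # NonFight
--             current_consecutive_fight = 0
--
--     # 임계값 이상의 연속 Fight가 있으면 Fight로 판정
--     return 1 if max_consecutive_fight >= consecutive_threshold else 0
-- ===== SOURCE B (Python) =====
-- def _apply_consecutive_window_logic(window_predictions, consecutive_threshold=5):
--     """Fight iff some window of consecutive_threshold consecutive predictions is all Fight."""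
--     if not window_predictions:
--         return 0
--     if consecutive_threshold <= 0:
--         return 1
--     n = len(window_predictions)
--     t = consecutive_threshold
--     return int(any(all(window_predictions[k] == 1 for k in range(i, i + t))
--                    for i in range(n - t + 1)))
-- ===== Notes on version B (the rewrite author's own statement) =====
-- stated objective: alternative
-- what changed: Replaces the running-counter-with-reset max-run pass by an existence check: any window of consecutive_threshold consecutive predictions that is all 1 (any/all over slices), with the same empty-list guard.
import Mathlib
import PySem

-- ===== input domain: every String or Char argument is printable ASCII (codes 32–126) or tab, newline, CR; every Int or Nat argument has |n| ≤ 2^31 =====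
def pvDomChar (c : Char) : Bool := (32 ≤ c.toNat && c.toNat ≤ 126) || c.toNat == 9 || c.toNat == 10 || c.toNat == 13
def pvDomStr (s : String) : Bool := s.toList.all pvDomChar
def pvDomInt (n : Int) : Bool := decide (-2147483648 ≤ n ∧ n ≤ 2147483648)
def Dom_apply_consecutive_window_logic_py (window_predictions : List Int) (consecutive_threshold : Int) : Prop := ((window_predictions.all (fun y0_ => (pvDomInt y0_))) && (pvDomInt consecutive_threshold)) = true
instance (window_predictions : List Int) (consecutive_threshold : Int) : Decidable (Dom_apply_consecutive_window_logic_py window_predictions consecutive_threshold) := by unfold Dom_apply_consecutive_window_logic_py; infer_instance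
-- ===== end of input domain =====

-- B replaces A's running-counter max-run pass by an any/all sliding-window existence check (alternative algorithm, same cost class).

-- ===== PORT A =====
-- literal transliteration: loop over predictions keeping (max_consecutive_fight, current_consecutive_fight)
def apply_consecutive_window_logic_py (window_predictions : List Int) (consecutive_threshold : Int) : Int :=
  if window_predictions = [] then 0
  else if (window_predictions.foldl
      (fun (st : Int × Int) prediction =>
        if prediction == 1 then (max st.1 (st.2 + 1), st.2 + 1)
        else (st.1, 0)) (0, 0)).1 ≥ consecutive_threshold then 1 else 0

-- ===== PORT B =====
-- literal transliteration of Source B: guard empty, guard non-positive threshold, then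
-- any(all(p == 1 for p in w[i:i+t]) for i in range(n - t + 1))
def apply_consecutive_window_logic_py_alt (window_predictions : List Int) (consecutive_threshold : Int) : Int :=
  if window_predictions = [] then 0
  else if consecutive_threshold ≤ 0 then 1
  else if (PySem.List.pyRange 0 ((window_predictions.length : Int) - consecutive_threshold + 1) 1).any
        (fun i => (PySem.List.pyRange i (i + consecutive_threshold) 1).all
          -- window_predictions[k]: k is always in range here, where pyGetD is exact
          (fun k => PySem.List.pyGetD window_predictions k 0 == 1))
    then 1 else 0

-- ===== PRECONDITION & SPEC =====
def Spec_apply_consecutive_window_logic_py (window_predictions : List Int) (consecutive_threshold : Int) (out : Int) : Prop := out = apply_consecutive_window_logic_py_alt window_predictions consecutive_threshold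
instance (window_predictions : List Int) (consecutive_threshold : Int) (out : Int) : Decidable (Spec_apply_consecutive_window_logic_py window_predictions consecutive_threshold out) := by unfold Spec_apply_consecutive_window_logic_py; infer_instance

-- ===== CLAIM (what is proved, stated in full; the proofs are below) =====
def Claim_equal_apply_consecutive_window_logic_py : Prop := ∀ (window_predictions : List Int) (consecutive_threshold : Int), Dom_apply_consecutive_window_logic_py window_predictions consecutive_threshold → Spec_apply_consecutive_window_logic_py window_predictions consecutive_threshold (apply_consecutive_window_logic_py window_predictions consecutive_threshold)

-- ===== LEMMAS AND PROOFS =====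

-- hRun w c = maximum run length of 1s in w, where the current run already has length c
def hRun : List Int → Int → Int
  | [], c => c
  | x :: xs, c => if x = 1 then hRun xs (c + 1) else max c (hRun xs 0)

theorem hRun_ge (l : List Int) (c : Int) : c ≤ hRun l c := by
  induction l generalizing c with
  | nil => simp [hRun]
  | cons x xs ih =>
    simp only [hRun]
    split
    · exact le_trans (by omega) (ih (c + 1))
    · exact le_max_left _ _

theorem hRun_mono (l : List Int) {c c' : Int} (h : c ≤ c') : hRun l c ≤ hRun l c' := by
  induction l generalizing c c' with
  | nil => simpa [hRun]
  | cons x xs ih =>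
    simp only [hRun]
    split
    · exact ih (by omega)
    · exact max_le_max h le_rfl

-- A's fold equals max m (hRun l c) under the loop invariant c ≤ m
theorem foldl_eq_hRun (l : List Int) (m c : Int) (hc : 0 ≤ c) (h : c ≤ m) :
    (l.foldl (fun (st : Int × Int) prediction =>
        if prediction == 1 then (max st.1 (st.2 + 1), st.2 + 1)
        else (st.1, 0)) (m, c)).1 = max m (hRun l c) := by
  induction l generalizing m c with
  | nil => simp [hRun, h]
  | cons x xs ih =>
    simp only [List.foldl_cons, hRun]
    by_cases hx : x = 1
    · rw [if_pos (by simpa using hx), if_pos hx,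
        ih (max m (c + 1)) (c + 1) (by omega) (le_max_right _ _),
        max_assoc, max_eq_right (hRun_ge xs (c + 1))]
    · rw [if_neg (by simpa using hx), if_neg hx, ih m 0 le_rfl (by omega),
        ← max_assoc, max_eq_left h]

theorem hRun_replicate_append (k : Nat) (u : List Int) (c : Int) :
    hRun (List.replicate k 1 ++ u) c = hRun u (c + k) := by
  induction k generalizing c with
  | zero => simp
  | succ k ih =>
    simp only [List.replicate_succ, List.cons_append, hRun, if_true]
    rw [ih]
    congr 1
    push_cast
    ring

theorem hRun_suffix_le (s rest : List Int) (c : Int) (hc : 0 ≤ c) :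
    hRun rest 0 ≤ hRun (s ++ rest) c := by
  induction s generalizing c with
  | nil => exact hRun_mono rest hc
  | cons x xs ih =>
    simp only [List.cons_append, hRun]
    split
    · exact ih (c + 1) (by omega)
    · exact le_max_of_le_right (ih 0 le_rfl)

theorem hRun_of_infix {w : List Int} {k : Nat}
    (h : List.replicate k (1 : Int) <:+: w) : (k : Int) ≤ hRun w 0 := by
  obtain ⟨s, u, rfl⟩ := h
  calc (k : Int) ≤ hRun u (0 + k) := by simpa using hRun_ge u k
    _ = hRun (List.replicate k 1 ++ u) 0 := (hRun_replicate_append k u 0).symm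
    _ ≤ hRun (s ++ (List.replicate k 1 ++ u)) 0 := hRun_suffix_le s _ 0 le_rfl
    _ = hRun (s ++ List.replicate k 1 ++ u) 0 := by rw [List.append_assoc]

theorem hRun_exists_run (w : List Int) (t : Int) :
    ∀ (c : Int), 0 ≤ c → t ≤ hRun w c →
      (∃ j : Nat, List.replicate j (1 : Int) <+: w ∧ t ≤ c + j) ∨
      List.replicate t.toNat (1 : Int) <:+: w := by
  induction w with
  | nil =>
    intro c _ h
    exact Or.inl ⟨0, List.nil_prefix, by simpa [hRun] using h⟩
  | cons x xs ih =>
    intro c hc ht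
    simp only [hRun] at ht
    by_cases hx : x = 1
    · rw [if_pos hx] at ht
      rcases ih (c + 1) (by omega) ht with ⟨j, hp, hj⟩ | hinf
      · refine Or.inl ⟨j + 1, ?_, by push_cast; omega⟩
        rw [List.replicate_succ]
        exact List.cons_prefix_cons.mpr ⟨hx.symm, hp⟩
      · exact Or.inr (hinf.trans (List.suffix_cons x xs).isInfix)
    · rw [if_neg hx] at ht
      by_cases hct : t ≤ c
      · exact Or.inl ⟨0, List.nil_prefix, by omega⟩
      · have ht' : t ≤ hRun xs 0 := by omega
        rcases ih 0 le_rfl ht' with ⟨j, hp, hj⟩ | hinf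
        · refine Or.inr ?_
          have hjt : t.toNat ≤ j := by omega
          have : List.replicate t.toNat (1 : Int) <+: List.replicate j 1 :=
            ⟨List.replicate (j - t.toNat) 1, by
              rw [← List.replicate_add]; congr 1; omega⟩
          exact ((this.trans hp).isInfix).trans (List.suffix_cons x xs).isInfix
        · exact Or.inr (hinf.trans (List.suffix_cons x xs).isInfix)

-- A's condition, expressed through hRun, is equivalent to an all-ones infix of length t
theorem hRun_iff_infix (w : List Int) (t : Int) (ht : 1 ≤ t) :
    t ≤ hRun w 0 ↔ List.replicate t.toNat (1 : Int) <:+: w := by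
  constructor
  · intro h
    rcases hRun_exists_run w t 0 le_rfl h with ⟨j, hp, hj⟩ | hinf
    · have : List.replicate t.toNat (1 : Int) <+: List.replicate j 1 :=
        ⟨List.replicate (j - t.toNat) 1, by
          rw [← List.replicate_add]; congr 1; omega⟩
      exact (this.trans hp).isInfix
    · exact hinf
  · intro h
    have := hRun_of_infix h
    omega

-- B's condition is equivalent to the same infix statement
theorem any_window_iff_infix (w : List Int) (t : Int) (ht : 1 ≤ t) :
    ((PySem.List.pyRange 0 ((w.length : Int) - t + 1) 1).any (fun i =>
       (PySem.List.pyRange i (i + t) 1).all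
         (fun k => PySem.List.pyGetD w k 0 == 1)) = true) ↔
    List.replicate t.toNat (1 : Int) <:+: w := by
  rw [List.any_eq_true]
  constructor
  · rintro ⟨i, hi, hall⟩
    rw [PySem.List.mem_pyRange_one] at hi
    obtain ⟨hi0, hilt⟩ := hi
    rw [List.all_eq_true] at hall
    set seg := (w.drop i.toNat).take t.toNat with hseg
    have hlen : seg.length = t.toNat := by
      simp only [hseg, List.length_take, List.length_drop]
      omega
    have hrep : seg = List.replicate t.toNat (1 : Int) := by
      rw [List.eq_replicate_iff]
      refine ⟨hlen, fun b hb => ?_⟩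
      obtain ⟨j, hj, hgetb⟩ := List.mem_iff_getElem.mp hb
      have hjt : j < t.toNat := hlen ▸ hj
      have hk : (i + (j : Int)) ∈ PySem.List.pyRange i (i + t) 1 := by
        rw [PySem.List.mem_pyRange_one]
        omega
      have h1 : PySem.List.pyGetD w (i + (j : Int)) 0 = 1 := by
        simpa using hall _ hk
      rw [PySem.List.pyGetD_eq_getElem w (i := i + (j : Int)) 0 (by omega) (by omega)] at h1
      have hidx : (i + (j : Int)).toNat = i.toNat + j := by omega
      rw [← hgetb]
      simp only [hseg, List.getElem_take, List.getElem_drop]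
      rw [← h1]
      congr 1
      omega
    rw [← hrep]
    exact ((List.take_prefix _ _).isInfix).trans ((List.drop_suffix _ _).isInfix)
  · rintro ⟨s, u, rfl⟩
    refine ⟨(s.length : Int), ?_, ?_⟩
    · rw [PySem.List.mem_pyRange_one]
      constructor
      · positivity
      · simp only [List.length_append, List.length_replicate]
        push_cast
        omega
    · rw [List.all_eq_true]
      intro k hk
      rw [PySem.List.mem_pyRange_one] at hk
      have hlen : (s ++ List.replicate t.toNat 1 ++ u).length
          = s.length + (t.toNat + u.length) := by simp
      have hk0 : 0 ≤ k := by omega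
      have hkl : k < ((s ++ List.replicate t.toNat 1 ++ u).length : Int) := by
        rw [hlen]; push_cast; omega
      have hge : s.length ≤ k.toNat := by omega
      have hlt : k.toNat - s.length < t.toNat := by omega
      rw [PySem.List.pyGetD_eq_getElem _ (i := k) 0 hk0 hkl,
        List.getElem_append_left (by simp; omega),
        List.getElem_append_right hge]
      simp

-- ===== VERDICT (by name: the statement is the Claim_ definition above) =====
theorem apply_consecutive_window_logic_py_spec : Claim_equal_apply_consecutive_window_logic_py := by
  intro w t _
  show apply_consecutive_window_logic_py w t = apply_consecutive_window_logic_py_alt w t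
  unfold apply_consecutive_window_logic_py apply_consecutive_window_logic_py_alt
  by_cases hw : w = []
  · simp [hw]
  · rw [if_neg hw, if_neg hw]
    rw [foldl_eq_hRun w 0 0 le_rfl le_rfl]
    have h0 := hRun_ge w 0
    by_cases ht : t ≤ 0
    · rw [if_pos ht, if_pos (by omega : max 0 (hRun w 0) ≥ t)]
    · rw [if_neg ht]
      have ht1 : 1 ≤ t := by omega
      have hiff : (max 0 (hRun w 0) ≥ t) ↔ t ≤ hRun w 0 := by
        constructor <;> intro h <;> omega
      by_cases hcond : t ≤ hRun w 0
      · rw [if_pos (hiff.mpr hcond),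
          if_pos (by
            exact (any_window_iff_infix w t ht1).mpr ((hRun_iff_infix w t ht1).mp hcond))]
      · rw [if_neg (fun h => hcond (hiff.mp h)),
          if_neg (fun h => hcond ((hRun_iff_infix w t ht1).mpr ((any_window_iff_infix w t ht1).mp h)))]
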